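-- pv_equiv track=rewrite | github.com/HudsonPryde/leetcode-daily | 2024-07/validMatrixGivenSums.py | restoreMatrix
-- ===== SOURCE A (Python) =====
-- from typing import List
--
-- def restoreMatrix(rowSum: List[int], colSum: List[int]) -> List[List[int]]:
--     grid = [[0]*len(colSum) for _ in range(len(rowSum))]
--     rowSum = list(zip(rowSum, range(len(rowSum))))
--     colSum = list(zip(colSum, range(len(colSum))))
--     while rowSum and colSum:
--         min_row, min_col = min(rowSum), min(colSum)
--         min_row_i, min_col_i = rowSum.index(min_row), colSum.index(min_col)
--
--         if min_row[0] <= min_col[0]: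
--             grid[min_row[1]][min_col[1]] = min_row[0]
--             colSum[min_col_i] = (min_col[0] - min_row[0], min_col[1])
--             rowSum.pop(min_row_i)
--         else:
--             grid[min_row[1]][min_col[1]] = min_col[0]
--             rowSum[min_row_i] = (min_row[0] - min_col[0], min_row[1])
--             colSum.pop(min_col_i)
--
--     return grid
-- ===== SOURCE B (Python) =====
-- from typing import List
--
--
-- def _insert(lst, x):
--     # insert x into the lexicographically sorted list lst, before the first
--     # element that is >= x
--     k = 0
--     while k < len(lst) and lst[k] < x:
--         k += 1
--     return lst[:k] + [x] + lst[k:]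
--
--
-- def restoreMatrix(rowSum: List[int], colSum: List[int]) -> List[List[int]]:
--     grid = [[0] * len(colSum) for _ in range(len(rowSum))]
--     rows = []
--     for i, v in enumerate(rowSum):
--         rows = _insert(rows, (v, i))
--     cols = []
--     for j, v in enumerate(colSum):
--         cols = _insert(cols, (v, j))
--     while rows and cols:
--         rv, ri = rows[0]
--         cv, cj = cols[0]
--         if rv <= cv:
--             grid[ri][cj] = rv
--             rows = rows[1:]
--             cols = _insert(cols[1:], (cv - rv, cj))
--         else:
--             grid[ri][cj] = cv
--             cols = cols[1:]
--             rows = _insert(rows[1:], (rv - cv, ri))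
--     return grid
-- ===== Notes on version B (the rewrite author's own statement) =====
-- stated objective: alternative
-- what changed: B maintains the (value,index) pairs as lexicographically sorted lists (built by insertion), so each step pops the minimum from the front and re-inserts the reduced element, instead of A's per-iteration min() scan plus .index() scan plus in-place pop.
import Mathlib
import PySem

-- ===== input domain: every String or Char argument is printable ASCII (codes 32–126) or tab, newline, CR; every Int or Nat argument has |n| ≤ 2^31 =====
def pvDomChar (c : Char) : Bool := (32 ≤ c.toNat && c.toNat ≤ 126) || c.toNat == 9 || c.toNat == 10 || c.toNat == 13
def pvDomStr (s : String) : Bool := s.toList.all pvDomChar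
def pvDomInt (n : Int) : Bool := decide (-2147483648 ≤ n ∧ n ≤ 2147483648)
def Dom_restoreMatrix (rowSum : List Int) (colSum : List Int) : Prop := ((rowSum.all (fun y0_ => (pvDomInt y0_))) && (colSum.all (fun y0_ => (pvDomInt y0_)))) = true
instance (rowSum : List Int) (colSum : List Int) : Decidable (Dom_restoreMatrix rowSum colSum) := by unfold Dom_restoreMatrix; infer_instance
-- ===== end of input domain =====

-- B keeps both pair lists sorted (built by insertion, minima popped from the front)
-- instead of A's repeated min/index/pop scans; same return value, alternative algorithm.

-- Shared helpers: Python's lexicographic `<` on (value, index) pairs, and grid[i][j] = v.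
def pairLtB (a b : Int × Nat) : Bool := decide (a.1 < b.1 ∨ (a.1 = b.1 ∧ a.2 < b.2))

def gridSet (g : List (List Int)) (i j : Nat) (v : Int) : List (List Int) :=
  g.set i ((g.getD i []).set j v)

-- ===== PORT A =====
-- Python `min` on a nonempty list of pairs: fold keeping the first smallest element.
def pyMin2 : (Int × Nat) → List (Int × Nat) → Int × Nat
  | m, [] => m
  | m, x :: t => pyMin2 (if pairLtB x m then x else m) t

-- `l[l.index(x)] = y`: replace the first occurrence of x (exact: x is present when used).
def setFirst : List (Int × Nat) → (Int × Nat) → (Int × Nat) → List (Int × Nat)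
  | [], _, _ => []
  | a :: t, x, y => if a = x then y :: t else a :: setFirst t x y

-- lemmas the ports' termination proofs cite
theorem pyMin2_mem : ∀ (m : Int × Nat) (l : List (Int × Nat)), pyMin2 m l ∈ m :: l := by
  intro m l
  induction l generalizing m with
  | nil => simp [pyMin2]
  | cons x t ih =>
    simp only [pyMin2]
    split
    · rcases List.mem_cons.mp (ih x) with h | h <;> simp [h]
    · rcases List.mem_cons.mp (ih m) with h | h <;> simp [h]

theorem setFirst_length : ∀ (l : List (Int × Nat)) (x y : Int × Nat),
    (setFirst l x y).length = l.length := by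
  intro l x y
  induction l with
  | nil => rfl
  | cons a t ih => simp only [setFirst]; split <;> simp [ih]

-- `l.pop(l.index(x))` = `l.erase x` (first occurrence; x is present when used).
def aLoop : List (List Int) → List (Int × Nat) → List (Int × Nat) → List (List Int)
  | grid, [], _ => grid
  | grid, _ :: _, [] => grid
  | grid, r :: rs, c :: cs =>
    let mr := pyMin2 r rs
    let mc := pyMin2 c cs
    if mr.1 ≤ mc.1 then
      aLoop (gridSet grid mr.2 mc.2 mr.1) ((r :: rs).erase mr)
        (setFirst (c :: cs) mc (mc.1 - mr.1, mc.2))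
    else
      aLoop (gridSet grid mr.2 mc.2 mc.1) (setFirst (r :: rs) mr (mr.1 - mc.1, mr.2))
        ((c :: cs).erase mc)
  termination_by _ rs cs => rs.length + cs.length
  decreasing_by
  · have h := List.length_erase_of_mem (pyMin2_mem r rs)
    simp only [setFirst_length] at *
    simp only [List.length_cons] at *
    omega
  · have h := List.length_erase_of_mem (pyMin2_mem c cs)
    simp only [setFirst_length] at *
    simp only [List.length_cons] at *
    omega

def restoreMatrix (rowSum : List Int) (colSum : List Int) : List (List Int) :=
  aLoop (List.replicate rowSum.length (List.replicate colSum.length 0))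
    rowSum.zipIdx colSum.zipIdx

-- ===== PORT B =====
-- Source B's `_insert`: insert x into a sorted list before the first element ≥ x.
def insSorted (x : Int × Nat) : List (Int × Nat) → List (Int × Nat)
  | [] => [x]
  | a :: t => if pairLtB a x then a :: insSorted x t else x :: a :: t

theorem insSorted_length : ∀ (x : Int × Nat) (l : List (Int × Nat)),
    (insSorted x l).length = l.length + 1 := by
  intro x l
  induction l with
  | nil => rfl
  | cons a t ih => simp only [insSorted]; split <;> simp [ih]

-- Source B's build loop: insert each (value, index) pair into the sorted list.
def buildSorted (l : List Int) : List (Int × Nat) :=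
  l.zipIdx.foldl (fun acc p => insSorted p acc) []

def bLoop : List (List Int) → List (Int × Nat) → List (Int × Nat) → List (List Int)
  | grid, [], _ => grid
  | grid, _ :: _, [] => grid
  | grid, r :: rs, c :: cs =>
    if r.1 ≤ c.1 then
      bLoop (gridSet grid r.2 c.2 r.1) rs (insSorted (c.1 - r.1, c.2) cs)
    else
      bLoop (gridSet grid r.2 c.2 c.1) (insSorted (r.1 - c.1, r.2) rs) cs
  termination_by _ rs cs => rs.length + cs.length
  decreasing_by
  · simp [insSorted_length]
  · simp [insSorted_length]

def restoreMatrix_alt (rowSum : List Int) (colSum : List Int) : List (List Int) :=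
  bLoop (List.replicate rowSum.length (List.replicate colSum.length 0))
    (buildSorted rowSum) (buildSorted colSum)

-- ===== PRECONDITION & SPEC =====
def Spec_restoreMatrix (rowSum : List Int) (colSum : List Int) (out : List (List Int)) : Prop := out = restoreMatrix_alt rowSum colSum
instance (rowSum : List Int) (colSum : List Int) (out : List (List Int)) : Decidable (Spec_restoreMatrix rowSum colSum out) := by unfold Spec_restoreMatrix; infer_instance

-- ===== CLAIM (what is proved, stated in full; the proofs are below) =====
def Claim_equal_restoreMatrix : Prop := ∀ (rowSum : List Int) (colSum : List Int), Dom_restoreMatrix rowSum colSum → Spec_restoreMatrix rowSum colSum (restoreMatrix rowSum colSum)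

-- ===== LEMMAS AND PROOFS =====

-- the lexicographic ≤ on pairs, as a Prop, and its order facts
def pLe (a b : Int × Nat) : Prop := a.1 < b.1 ∨ (a.1 = b.1 ∧ a.2 ≤ b.2)

theorem pLe_refl (a : Int × Nat) : pLe a a := by simp [pLe]

theorem pLe_trans {a b c : Int × Nat} (h1 : pLe a b) (h2 : pLe b c) : pLe a c := by
  rcases h1 with h1 | ⟨h1, h1'⟩ <;> rcases h2 with h2 | ⟨h2, h2'⟩ <;> simp [pLe] <;> omega

theorem pLe_antisymm {a b : Int × Nat} (h1 : pLe a b) (h2 : pLe b a) : a = b := by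
  obtain ⟨a1, a2⟩ := a; obtain ⟨b1, b2⟩ := b
  simp only [pLe] at h1 h2
  simp only [Prod.mk.injEq]
  omega

theorem pairLtB_true {a b : Int × Nat} :
    pairLtB a b = true ↔ (a.1 < b.1 ∨ (a.1 = b.1 ∧ a.2 < b.2)) := by
  simp [pairLtB]

theorem pairLtB_false {a b : Int × Nat} : pairLtB a b = false ↔ pLe b a := by
  obtain ⟨a1, a2⟩ := a; obtain ⟨b1, b2⟩ := b
  simp only [pairLtB, pLe, decide_eq_false_iff_not]
  omega

theorem pLt_pLe {a b : Int × Nat} (h : pairLtB a b = true) : pLe a b := by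
  rcases pairLtB_true.mp h with h | ⟨h, h'⟩ <;> simp [pLe] <;> omega

-- pyMin2 returns a lower bound of all elements
theorem pyMin2_least : ∀ (m : Int × Nat) (l : List (Int × Nat)) (x : Int × Nat),
    x ∈ m :: l → pLe (pyMin2 m l) x := by
  intro m l
  induction l generalizing m with
  | nil => intro x hx; simp at hx; subst hx; exact pLe_refl _
  | cons a t ih =>
    intro x hx
    have hmin : pLe (pyMin2 (if pairLtB a m then a else m) t) (if pairLtB a m then a else m) :=
      ih _ _ List.mem_cons_self
    have hm : pLe (if pairLtB a m then a else m) m := by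
      split
      · exact pLt_pLe ‹_›
      · exact pLe_refl _
    have ha : pLe (if pairLtB a m then a else m) a := by
      by_cases hc : pairLtB a m = true
      · rw [if_pos hc]; exact pLe_refl _
      · rw [if_neg hc]; exact pairLtB_false.mp (Bool.eq_false_iff.mpr hc)
    simp only [pyMin2]
    rcases List.mem_cons.mp hx with h | h
    · subst h; exact pLe_trans hmin hm
    · rcases List.mem_cons.mp h with h | h
      · subst h; exact pLe_trans hmin ha
      · exact ih _ x (List.mem_cons_of_mem _ h)

-- the min of a list that is a permutation of a sorted list is the sorted list's head
theorem pyMin2_eq_sorted_head {r b : Int × Nat} {rs t : List (Int × Nat)}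
    (hp : (r :: rs).Perm (b :: t)) (hs : (b :: t).Pairwise pLe) :
    pyMin2 r rs = b := by
  have hmem : pyMin2 r rs ∈ b :: t := hp.mem_iff.mp (pyMin2_mem r rs)
  have hbm : pLe b (pyMin2 r rs) := by
    rcases List.mem_cons.mp hmem with h | h
    · rw [h]; exact pLe_refl _
    · exact (List.pairwise_cons.mp hs).1 _ h
  have hmb : pLe (pyMin2 r rs) b :=
    pyMin2_least r rs b (hp.mem_iff.mpr List.mem_cons_self)
  exact pLe_antisymm hmb hbm

theorem setFirst_perm : ∀ (l : List (Int × Nat)) (x y : Int × Nat), x ∈ l →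
    (setFirst l x y).Perm (y :: l.erase x) := by
  intro l x y hx
  induction l with
  | nil => simp at hx
  | cons a t ih =>
    by_cases h : a = x
    · subst h
      simp [setFirst, List.erase_cons_head]
    · have hx' : x ∈ t := by
        rcases List.mem_cons.mp hx with h' | h'
        · exact absurd h'.symm h
        · exact h'
      have hne : (a == x) = false := by simp [h]
      simp only [setFirst, if_neg h, List.erase_cons, hne]
      exact ((ih hx').cons a).trans (List.Perm.swap y a _)

theorem insSorted_perm : ∀ (x : Int × Nat) (l : List (Int × Nat)),
    (insSorted x l).Perm (x :: l) := by
  intro x l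
  induction l with
  | nil => simp [insSorted]
  | cons a t ih =>
    simp only [insSorted]
    split
    · exact (ih.cons a).trans (List.Perm.swap x a t)
    · exact List.Perm.refl _

theorem insSorted_pairwise : ∀ (x : Int × Nat) (l : List (Int × Nat)),
    l.Pairwise pLe → (insSorted x l).Pairwise pLe := by
  intro x l
  induction l with
  | nil => intro _; simp [insSorted, List.pairwise_cons]
  | cons a t ih =>
    intro h
    obtain ⟨ha, ht⟩ := List.pairwise_cons.mp h
    simp only [insSorted]
    by_cases hc : pairLtB a x = true
    · rw [if_pos hc]
      refine List.pairwise_cons.mpr ⟨?_, ih ht⟩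
      intro b hb
      rcases List.mem_cons.mp ((insSorted_perm x t).mem_iff.mp hb) with h1 | h1
      · rw [h1]; exact pLt_pLe hc
      · exact ha b h1
    · rw [if_neg hc]
      have hxa : pLe x a := pairLtB_false.mp (Bool.eq_false_iff.mpr hc)
      refine List.pairwise_cons.mpr ⟨?_, h⟩
      intro b hb
      rcases List.mem_cons.mp hb with h1 | h1
      · rw [h1]; exact hxa
      · exact pLe_trans hxa (ha b h1)

theorem buildSorted_aux : ∀ (L acc : List (Int × Nat)),
    (L.foldl (fun acc p => insSorted p acc) acc).Perm (acc ++ L) ∧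
    (acc.Pairwise pLe → (L.foldl (fun acc p => insSorted p acc) acc).Pairwise pLe) := by
  intro L
  induction L with
  | nil => intro acc; simp
  | cons x t ih =>
    intro acc
    constructor
    · have h1 := (ih (insSorted x acc)).1
      refine h1.trans ?_
      have h2 : (insSorted x acc ++ t).Perm ((x :: acc) ++ t) :=
        (insSorted_perm x acc).append_right t
      refine h2.trans ?_
      exact List.perm_middle.symm
    · intro hacc
      exact (ih (insSorted x acc)).2 (insSorted_pairwise x acc hacc)

theorem buildSorted_perm (l : List Int) : (buildSorted l).Perm l.zipIdx := by
  simpa [buildSorted] using (buildSorted_aux l.zipIdx []).1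

theorem buildSorted_pairwise (l : List Int) : (buildSorted l).Pairwise pLe :=
  (buildSorted_aux l.zipIdx []).2 (by simp)

-- the core equivalence: the two loops agree whenever B's lists are sorted
-- permutations of A's lists
theorem loop_eq : ∀ (n : Nat) (grid : List (List Int)) (rs cs rs₂ cs₂ : List (Int × Nat)),
    rs.length + cs.length = n → rs.Perm rs₂ → cs.Perm cs₂ →
    rs₂.Pairwise pLe → cs₂.Pairwise pLe →
    aLoop grid rs cs = bLoop grid rs₂ cs₂ := by
  intro n
  induction n using Nat.strong_induction_on with
  | _ n ih =>
    intro grid rs cs rs₂ cs₂ hn hpr hpc hsr hsc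
    match rs, cs with
    | [], cs =>
      have : rs₂ = [] := hpr.nil_eq.symm
      subst this
      simp [aLoop, bLoop]
    | r :: rs', [] =>
      have : cs₂ = [] := hpc.nil_eq.symm
      subst this
      cases rs₂ with
      | nil => exact absurd hpr.symm.nil_eq (by simp)
      | cons b t => simp [aLoop, bLoop]
    | r :: rs', c :: cs' =>
      match rs₂, cs₂ with
      | [], _ => exact absurd hpr.symm.nil_eq (by simp)
      | _ :: _, [] => exact absurd hpc.symm.nil_eq (by simp)
      | b :: t, d :: u =>
        simp only [List.length_cons] at hn
        have hmr : pyMin2 r rs' = b := pyMin2_eq_sorted_head hpr hsr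
        have hmc : pyMin2 c cs' = d := pyMin2_eq_sorted_head hpc hsc
        have hbmem : b ∈ r :: rs' := hpr.mem_iff.mpr List.mem_cons_self
        have hdmem : d ∈ c :: cs' := hpc.mem_iff.mpr List.mem_cons_self
        have hst : t.Pairwise pLe := (List.pairwise_cons.mp hsr).2
        have hsu : u.Pairwise pLe := (List.pairwise_cons.mp hsc).2
        simp only [aLoop, bLoop, hmr, hmc]
        by_cases hcond : b.1 ≤ d.1
        · simp only [if_pos hcond]
          have hre : ((r :: rs').erase b).Perm t := by
            have := hpr.erase b
            rwa [List.erase_cons_head] at this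
          have hce : (setFirst (c :: cs') d (d.1 - b.1, d.2)).Perm
              (insSorted (d.1 - b.1, d.2) u) := by
            refine (setFirst_perm _ _ _ hdmem).trans ?_
            refine List.Perm.trans ?_ (insSorted_perm (d.1 - b.1, d.2) u).symm
            refine List.Perm.cons _ ?_
            have := hpc.erase d
            rwa [List.erase_cons_head] at this
          refine ih (rs'.length + cs'.length + 1) (by omega) _ _ _ _ _ ?_ hre hce hst
            (insSorted_pairwise _ _ hsu)
          have h1 := List.length_erase_of_mem hbmem
          have h2 := setFirst_length (c :: cs') d (d.1 - b.1, d.2)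
          simp only [List.length_cons] at *
          omega
        · simp only [if_neg hcond]
          have hce : ((c :: cs').erase d).Perm u := by
            have := hpc.erase d
            rwa [List.erase_cons_head] at this
          have hre : (setFirst (r :: rs') b (b.1 - d.1, b.2)).Perm
              (insSorted (b.1 - d.1, b.2) t) := by
            refine (setFirst_perm _ _ _ hbmem).trans ?_
            refine List.Perm.trans ?_ (insSorted_perm (b.1 - d.1, b.2) t).symm
            refine List.Perm.cons _ ?_
            have := hpr.erase b
            rwa [List.erase_cons_head] at this
          refine ih (rs'.length + cs'.length + 1) (by omega) _ _ _ _ _ ?_ hre hce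
            (insSorted_pairwise _ _ hst) hsu
          have h1 := List.length_erase_of_mem hdmem
          have h2 := setFirst_length (r :: rs') b (b.1 - d.1, b.2)
          simp only [List.length_cons] at *
          omega

-- ===== VERDICT (by name: the statement is the Claim_ definition above) =====
theorem restoreMatrix_spec : Claim_equal_restoreMatrix := by
  intro rowSum colSum _
  unfold Spec_restoreMatrix restoreMatrix restoreMatrix_alt
  exact loop_eq _ _ _ _ _ _ rfl (buildSorted_perm rowSum).symm (buildSorted_perm colSum).symm
    (buildSorted_pairwise rowSum) (buildSorted_pairwise colSum)
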